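-- pv_equiv track=rewrite | github.com/LogicalContradiction/advent_of_code | day06/src/solution.py | get_first_unique_sequence_index_of_length
-- ===== SOURCE A (Python) =====
-- def is_start_of_packet_marker(sequence):
-- 	"""Checks a sequence of characters to see if it's the start of packet marker. To be the marker, all characters must be unique.
--
-- 	Parameters:
-- 		sequence (str): A string representing the character sequence that needs to be checked.
--
-- 	Returns:
-- 		bool: True if all of the characters are unique, otherwise False."""
-- 	sort_seq = sorted(sequence)
-- 	for index in range(1, len(sort_seq)):
-- 		char = sort_seq[index]
-- 		prev_char = sort_seq[index-1]
-- 		if char == prev_char: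
-- 			return False
-- 	return True
--
-- def get_first_unique_sequence_index_of_length(datastream, length):
-- 	"""Searches the datastream for a group of unique characters of the given length.
--
-- 	Parameters:
-- 		datastream (str): String of characters representing the datastream.
-- 		length (int): The length of the group of unique characters.
--
-- 	Returns:
-- 		int: The number of characters from the beginning of the buffer to the end of the first unique group of characters."""
-- 	ptr_start = 0
-- 	ptr_end = length
-- 	while ptr_end < len(datastream):
-- 		if is_start_of_packet_marker(datastream[ptr_start:ptr_end]):
-- 			return ptr_end
-- 		ptr_start += 1
-- 		ptr_end += 1
-- 	return -1
-- ===== SOURCE B (Python) =====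
-- def get_first_unique_sequence_index_of_length(datastream, length):
-- 	n = len(datastream)
-- 	if length >= n:
-- 		return -1
-- 	counts = {}
-- 	dups = 0
-- 	for j in range(length):  # build counts for the first window [0, length)
-- 		c = datastream[j]
-- 		counts[c] = counts.get(c, 0) + 1
-- 		if counts[c] == 2:
-- 			dups += 1
-- 	for e in range(length, n):  # window [e - length, e)
-- 		if dups == 0:
-- 			return e
-- 		incoming = datastream[e]
-- 		counts[incoming] = counts.get(incoming, 0) + 1
-- 		if counts[incoming] == 2:
-- 			dups += 1
-- 		outgoing = datastream[e - length]
-- 		counts[outgoing] -= 1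
-- 		if counts[outgoing] == 1:
-- 			dups -= 1
-- 	return -1
-- ===== Notes on version B (the rewrite author's own statement) =====
-- stated objective: faster
-- what changed: A re-sorts every window and scans it for adjacent duplicates (O(n*L log L)); B makes a single sliding-window pass that maintains a character-count dict and a duplicate counter incrementally, so each window move is O(1) dict work.
-- outside the precondition, e.g. on get_first_unique_sequence_index_of_length('abcabc', -2): A returns 0, B returns -2
import Mathlib
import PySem

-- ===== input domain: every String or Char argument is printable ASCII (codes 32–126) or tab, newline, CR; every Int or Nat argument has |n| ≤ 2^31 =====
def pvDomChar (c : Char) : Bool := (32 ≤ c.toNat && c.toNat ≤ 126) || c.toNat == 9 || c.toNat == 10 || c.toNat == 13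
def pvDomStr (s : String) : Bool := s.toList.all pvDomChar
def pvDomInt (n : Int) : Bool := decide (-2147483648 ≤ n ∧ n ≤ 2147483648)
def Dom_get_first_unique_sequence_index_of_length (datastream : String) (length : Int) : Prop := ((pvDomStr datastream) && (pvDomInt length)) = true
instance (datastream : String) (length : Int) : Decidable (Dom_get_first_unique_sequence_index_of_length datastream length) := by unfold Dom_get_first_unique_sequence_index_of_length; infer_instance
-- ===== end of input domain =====

-- B replaces A's per-window sort-and-scan uniqueness test by one sliding-window pass with an
-- incrementally maintained character-count dict and duplicate counter (objective: faster).

-- ===== PORT A =====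
-- helper: the 'for index in range(1, len(sort_seq))' loop with early 'return False'
def pvMarkerLoop (sort_seq : List Char) : List Int → Bool
  | [] => true
  | index :: rest =>
      let char := PySem.List.pyGetD sort_seq index ' '
      let prev_char := PySem.List.pyGetD sort_seq (index - 1) ' '
      if char == prev_char then false else pvMarkerLoop sort_seq rest

def is_start_of_packet_marker (sequence : String) : Bool :=
  let sort_seq := PySem.List.sorted sequence.toList (fun c => c)
  pvMarkerLoop sort_seq (PySem.List.pyRange 1 (sort_seq.length : Int))

-- the 'while ptr_end < len(datastream)' loop
def pvAWhile (ds : List Char) (ptr_start ptr_end : Int) : Int :=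
  if _h : ptr_end < (ds.length : Int) then
    if is_start_of_packet_marker (String.ofList (PySem.List.slice ds (some ptr_start) (some ptr_end))) then
      ptr_end
    else
      pvAWhile ds (ptr_start + 1) (ptr_end + 1)
  else
    -1
  termination_by ((ds.length : Int) - ptr_end).toNat
  decreasing_by simp_wf; omega

def get_first_unique_sequence_index_of_length (datastream : String) (length : Int) : Int :=
  pvAWhile datastream.toList 0 length

-- ===== PORT B =====
-- body of B's first loop (fill counts/dups for the initial window)
def pvBStep (ds : List Char) (st : PySem.Dict Char Int × Int) (j : Int) : PySem.Dict Char Int × Int :=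
  let c := PySem.List.pyGetD ds j ' '
  let counts := st.1.insert c (st.1.getD c 0 + 1)
  let dups := if counts.getD c 0 == 2 then st.2 + 1 else st.2
  (counts, dups)

-- B's second loop: slide the window, early 'return e' when dups == 0
def pvBScan (ds : List Char) (length : Int) : List Int → PySem.Dict Char Int → Int → Int
  | [], _, _ => -1
  | e :: rest, counts, dups =>
    if dups == 0 then e
    else
      let incoming := PySem.List.pyGetD ds e ' '
      let counts1 := counts.insert incoming (counts.getD incoming 0 + 1)
      let dups1 := if counts1.getD incoming 0 == 2 then dups + 1 else dups
      let outgoing := PySem.List.pyGetD ds (e - length) ' '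
      let counts2 := counts1.insert outgoing (counts1.getD outgoing 0 - 1)
      let dups2 := if counts2.getD outgoing 0 == 1 then dups1 - 1 else dups1
      pvBScan ds length rest counts2 dups2

def get_first_unique_sequence_index_of_length_alt (datastream : String) (length : Int) : Int :=
  let ds := datastream.toList
  let n : Int := ds.length
  if length ≥ n then -1
  else
    let st := (PySem.List.pyRange 0 length).foldl (pvBStep ds) (PySem.Dict.empty, 0)
    pvBScan ds length (PySem.List.pyRange length n) st.1 st.2

-- ===== PRECONDITION & SPEC =====
-- Pre_ excludes negative window lengths (outside the function's natural domain), where A's returned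
-- value is an artefact of Python's negative-index slicing.
def Pre_get_first_unique_sequence_index_of_length (datastream : String) (length : Int) : Prop := 0 ≤ length
instance (datastream : String) (length : Int) : Decidable (Pre_get_first_unique_sequence_index_of_length datastream length) := by unfold Pre_get_first_unique_sequence_index_of_length; infer_instance

def pvWitness_get_first_unique_sequence_index_of_length : String × Int := ("abcd", 3)

def Spec_get_first_unique_sequence_index_of_length (datastream : String) (length : Int) (out : Int) : Prop := out = get_first_unique_sequence_index_of_length_alt datastream length
instance (datastream : String) (length : Int) (out : Int) : Decidable (Spec_get_first_unique_sequence_index_of_length datastream length out) := by unfold Spec_get_first_unique_sequence_index_of_length; infer_instance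

-- ===== CLAIM (what is proved, stated in full; the proofs are below) =====
def Claim_equal_get_first_unique_sequence_index_of_length : Prop := ∀ (datastream : String) (length : Int), Dom_get_first_unique_sequence_index_of_length datastream length → Pre_get_first_unique_sequence_index_of_length datastream length → Spec_get_first_unique_sequence_index_of_length datastream length (get_first_unique_sequence_index_of_length datastream length)

-- ===== LEMMAS AND PROOFS =====

-- the window of length L ending (exclusively) at index e
def pvWin (ds : List Char) (L e : Int) : List Char := (ds.drop (e - L).toNat).take L.toNat

-- the set of characters occurring at least twice in w
def pvDupF (w : List Char) : Finset Char := w.toFinset.filter (fun c => 2 ≤ w.count c)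

-- loop invariant of B's scan: counts holds the multiset of the current window, dups = #duplicated chars
def pvInv (ds : List Char) (L e : Int) (counts : PySem.Dict Char Int) (dups : Int) : Prop :=
  (∀ c, counts.getD c 0 = ((pvWin ds L e).count c : Int)) ∧
  dups = ((pvDupF (pvWin ds L e)).card : Int)

-- reference: first e in the index list whose window is duplicate-free, else -1
def pvFirst (ds : List Char) (L : Int) : List Int → Int
  | [] => -1
  | e :: rest => if (pvWin ds L e).Nodup then e else pvFirst ds L rest

theorem pv_mem_dupF (w : List Char) (c : Char) : c ∈ pvDupF w ↔ 2 ≤ w.count c := by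
  simp only [pvDupF, Finset.mem_filter, List.mem_toFinset]
  constructor
  · exact fun h => h.2
  · exact fun h => ⟨List.count_pos_iff.mp (by omega), h⟩

theorem pv_dupF_card_zero_iff (w : List Char) : (pvDupF w).card = 0 ↔ w.Nodup := by
  rw [Finset.card_eq_zero, Finset.eq_empty_iff_forall_notMem, List.nodup_iff_count_le_one]
  constructor
  · intro h a; have := h a; rw [pv_mem_dupF] at this; omega
  · intro h a; rw [pv_mem_dupF]; have := h a; omega

-- adding one occurrence of c changes the duplicate count by 1 exactly when c's count becomes 2
theorem pv_card_dupF_add (w w' : List Char) (c : Char)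
    (h : ∀ x, w'.count x = w.count x + (if x = c then 1 else 0)) :
    ((pvDupF w').card : Int) = (pvDupF w).card + (if w'.count c = 2 then 1 else 0) := by
  have hc : w'.count c = w.count c + 1 := by rw [h c, if_pos rfl]
  rcases Nat.lt_or_ge (w.count c) 1 with h0 | h1
  · have hset : pvDupF w' = pvDupF w := by
      ext x; rw [pv_mem_dupF, pv_mem_dupF, h x]; by_cases hx : x = c
      · subst hx; rw [if_pos rfl]; omega
      · rw [if_neg hx]; omega
    rw [hset, if_neg (by omega)]; ring
  rcases Nat.lt_or_ge (w.count c) 2 with h2 | h3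
  · have hset : pvDupF w' = insert c (pvDupF w) := by
      ext x; rw [pv_mem_dupF, Finset.mem_insert, pv_mem_dupF, h x]; by_cases hx : x = c
      · subst hx; rw [if_pos rfl]
        constructor
        · intro _; exact Or.inl rfl
        · intro _; omega
      · rw [if_neg hx]
        constructor
        · intro hh; exact Or.inr hh
        · rintro (hh | hh)
          · exact absurd hh hx
          · exact hh
    have hnot : c ∉ pvDupF w := by rw [pv_mem_dupF]; omega
    rw [hset, Finset.card_insert_of_notMem hnot, if_pos (by omega)]
    push_cast; ring
  · have hset : pvDupF w' = pvDupF w := by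
      ext x; rw [pv_mem_dupF, pv_mem_dupF, h x]; by_cases hx : x = c
      · subst hx; rw [if_pos rfl]; omega
      · rw [if_neg hx]; omega
    rw [hset, if_neg (by omega)]; ring

theorem pv_markerLoop_iff (s : List Char) (idxs : List Int) :
    pvMarkerLoop s idxs = true ↔ ∀ j ∈ idxs, PySem.List.pyGetD s j ' ' ≠ PySem.List.pyGetD s (j - 1) ' ' := by
  induction idxs with
  | nil => simp [pvMarkerLoop]
  | cons a rest ih =>
    simp only [pvMarkerLoop, List.mem_cons]
    by_cases h : PySem.List.pyGetD s a ' ' == PySem.List.pyGetD s (a - 1) ' '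
    · rw [if_pos h]
      constructor
      · intro hfalse; exact absurd hfalse (by simp)
      · intro hall; exact absurd (eq_of_beq h) (hall a (Or.inl rfl))
    · rw [if_neg h, ih]
      constructor
      · intro hall j hj
        rcases hj with hj | hj
        · subst hj; exact fun he => h (beq_of_eq he)
        · exact hall j hj
      · intro hall j hj; exact hall j (Or.inr hj)

-- a ≤-sorted list is duplicate-free iff no two ADJACENT entries are equal
theorem pv_adj_nodup (s : List Char) (hpair : s.Pairwise (· ≤ ·)) :
    (∀ k : Nat, (h : k + 1 < s.length) → s[k + 1] ≠ s[k]'(by omega)) ↔ s.Nodup := by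
  have mono := List.pairwise_iff_getElem.mp hpair
  constructor
  · intro hadj
    have strict : ∀ (d i : Nat) (h : i + d + 1 < s.length), s[i]'(by omega) < s[i + d + 1]'h := by
      intro d
      induction d with
      | zero =>
        intro i h
        have hne := hadj i h
        have hle := mono i (i + 1) (by omega) h (by omega)
        exact lt_of_le_of_ne hle (fun hh => hne hh.symm)
      | succ d ih =>
        intro i h
        have h1 := ih i (by omega)
        have hne := hadj (i + d + 1) h
        have hle := mono (i + d + 1) (i + d + 2) (by omega) h (by omega)
        exact h1.trans (lt_of_le_of_ne hle (fun hh => hne hh.symm))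
    have : s.Pairwise (· ≠ ·) := by
      rw [List.pairwise_iff_getElem]
      intro i j hi hj hij
      have hs := strict (j - i - 1) i (by omega)
      have he : i + (j - i - 1) + 1 = j := by omega
      simp only [he] at hs
      exact ne_of_lt hs
    exact this
  · intro hnd k h
    have hp : s.Pairwise (· ≠ ·) := hnd
    exact (List.pairwise_iff_getElem.mp hp k (k + 1) (by omega) h (by omega)).symm

-- A's helper computes List.Nodup
theorem pv_marker_eq_nodup (w : List Char) :
    is_start_of_packet_marker (String.ofList w) = decide w.Nodup := by
  simp only [is_start_of_packet_marker]
  have htl : (String.ofList w).toList = w := by simp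
  rw [htl]
  set s := PySem.List.sorted w (fun c => c) with hs
  have hpair : s.Pairwise (· ≤ ·) := PySem.List.sorted_pairwise w (fun c => c)
  have hperm : s.Perm w := PySem.List.sorted_perm w (fun c => c) false
  rw [Bool.eq_iff_iff, decide_eq_true_eq, pv_markerLoop_iff, ← hperm.nodup_iff,
    ← pv_adj_nodup s hpair]
  constructor
  · intro hall k h
    have := hall ((k : Int) + 1) (by rw [PySem.List.mem_pyRange_one]; omega)
    rw [PySem.List.pyGetD_eq_getElem s ' ' (by omega) (by omega),
        PySem.List.pyGetD_eq_getElem s ' ' (by omega) (by omega)] at this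
    simpa using this
  · intro hadj j hj
    rw [PySem.List.mem_pyRange_one] at hj
    rw [PySem.List.pyGetD_eq_getElem s ' ' (by omega) (by omega),
        PySem.List.pyGetD_eq_getElem s ' ' (by omega) (by omega)]
    have hk : j.toNat = (j - 1).toNat + 1 := by omega
    have := hadj (j - 1).toNat (by omega)
    simp only [← hk] at this
    exact this

-- extending a window by its next character
theorem pv_take_snoc (ds : List Char) (s k : Nat) (h : s + k < ds.length) :
    (ds.drop s).take (k + 1) = (ds.drop s).take k ++ [ds[s + k]'h] := by
  rw [List.take_add_one, List.getElem?_drop]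
  rw [List.getElem?_eq_getElem h]
  rfl

-- B's insert step preserves the invariant (window grows by one occurrence of c)
theorem pv_insert_inv (counts : PySem.Dict Char Int) (dups : Int) (w : List Char) (c : Char)
    (h1 : ∀ x, counts.getD x 0 = (w.count x : Int))
    (h2 : dups = ((pvDupF w).card : Int)) :
    (∀ x, (counts.insert c (counts.getD c 0 + 1)).getD x 0 = ((w ++ [c]).count x : Int)) ∧
    ((if (counts.insert c (counts.getD c 0 + 1)).getD c 0 == 2 then dups + 1 else dups)
      = ((pvDupF (w ++ [c])).card : Int)) := by
  have hcnt : ∀ x, (w ++ [c]).count x = w.count x + (if x = c then 1 else 0) := by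
    intro x
    rw [List.count_append, List.count_cons, List.count_nil]
    by_cases hx : x = c
    · subst hx; rw [if_pos (beq_iff_eq.mpr rfl), if_pos rfl]
    · rw [if_neg (fun hh => hx (eq_of_beq hh).symm), if_neg hx]
  have hget : ∀ x, (counts.insert c (counts.getD c 0 + 1)).getD x 0 = ((w ++ [c]).count x : Int) := by
    intro x
    rw [PySem.Dict.getD_insert, hcnt x]
    by_cases hx : x = c
    · subst hx; rw [if_pos rfl, if_pos rfl, h1]; push_cast; ring
    · rw [if_neg hx, if_neg hx, h1]; push_cast; ring
  refine ⟨hget, ?_⟩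
  have hcard := pv_card_dupF_add w (w ++ [c]) c hcnt
  rw [hget c, h2, hcard]
  by_cases h2c : (w ++ [c]).count c = 2
  · rw [if_pos (beq_iff_eq.mpr (by exact_mod_cast congrArg (Nat.cast : Nat → Int) h2c)), if_pos h2c]
  · rw [if_neg (by simp only [beq_iff_eq]; exact_mod_cast fun hh => h2c (by exact_mod_cast hh)), if_neg h2c]
    ring

-- B's decrement step preserves the invariant (window sheds its first character c)
theorem pv_remove_inv (counts : PySem.Dict Char Int) (dups : Int) (w' : List Char) (c : Char)
    (h1 : ∀ x, counts.getD x 0 = ((c :: w').count x : Int))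
    (h2 : dups = ((pvDupF (c :: w')).card : Int)) :
    (∀ x, (counts.insert c (counts.getD c 0 - 1)).getD x 0 = (w'.count x : Int)) ∧
    ((if (counts.insert c (counts.getD c 0 - 1)).getD c 0 == 1 then dups - 1 else dups)
      = ((pvDupF w').card : Int)) := by
  have hcnt : ∀ x, (c :: w').count x = w'.count x + (if x = c then 1 else 0) := by
    intro x
    rw [List.count_cons]
    by_cases hx : x = c
    · subst hx; rw [if_pos (beq_iff_eq.mpr rfl), if_pos rfl]
    · rw [if_neg (fun hh => hx (eq_of_beq hh).symm), if_neg hx]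
  have hget : ∀ x, (counts.insert c (counts.getD c 0 - 1)).getD x 0 = (w'.count x : Int) := by
    intro x
    rw [PySem.Dict.getD_insert]
    by_cases hx : x = c
    · subst hx; rw [if_pos rfl, h1]
      have := hcnt x
      rw [if_pos rfl] at this
      rw [this]; push_cast; ring
    · rw [if_neg hx, h1]
      have := hcnt x
      rw [if_neg hx] at this
      rw [this]; push_cast; ring
  refine ⟨hget, ?_⟩
  have hcard := pv_card_dupF_add w' (c :: w') c hcnt
  have hcc : (c :: w').count c = w'.count c + 1 := by rw [hcnt c, if_pos rfl]
  rw [hget c, h2, hcard]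
  by_cases h2c : (c :: w').count c = 2
  · rw [if_pos (beq_iff_eq.mpr (by omega)), if_pos h2c]
    ring
  · rw [if_neg (by simp only [beq_iff_eq]; omega), if_neg h2c]
    ring

-- A's while loop returns the first window end whose window is duplicate-free
theorem pv_AWhile_eq_first (ds : List Char) (L : Int) (hL : 0 ≤ L) :
    ∀ (k : Nat) (e : Int), L ≤ e → e + (k : Int) = (ds.length : Int) →
      pvAWhile ds (e - L) e = pvFirst ds L (PySem.List.pyRange e (ds.length : Int)) := by
  intro k
  induction k with
  | zero =>
    intro e _ he
    rw [pvAWhile, dif_neg (by omega), PySem.List.pyRange_one_eq_nil (by omega)]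
    rfl
  | succ k ih =>
    intro e hLe he
    have hlt : e < (ds.length : Int) := by push_cast at he ⊢; omega
    rw [pvAWhile, dif_pos hlt, PySem.List.pyRange_one_cons hlt]
    have hslice : PySem.List.slice ds (some (e - L)) (some e) = pvWin ds L e := by
      rw [PySem.List.slice_toNat ds (by omega) (by omega)]
      unfold pvWin
      congr 1
      omega
    rw [hslice, pv_marker_eq_nodup]
    simp only [pvFirst]
    by_cases hnd : (pvWin ds L e).Nodup
    · rw [if_pos (by simpa using hnd), if_pos hnd]
    · rw [if_neg (by simpa using hnd), if_neg hnd]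
      have harg : e - L + 1 = (e + 1) - L := by ring
      rw [harg]
      exact ih (e + 1) (by omega) (by push_cast at he ⊢; omega)

-- B's scan returns the same first window end, given the invariant
theorem pv_BScan_eq_first (ds : List Char) (L : Int) (hL : 0 ≤ L) :
    ∀ (k : Nat) (e : Int) (counts : PySem.Dict Char Int) (dups : Int),
      L ≤ e → e + (k : Int) = (ds.length : Int) → pvInv ds L e counts dups →
      pvBScan ds L (PySem.List.pyRange e (ds.length : Int)) counts dups
        = pvFirst ds L (PySem.List.pyRange e (ds.length : Int)) := by
  intro k
  induction k with
  | zero =>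
    intro e counts dups _ he _
    rw [PySem.List.pyRange_one_eq_nil (by omega)]
    rfl
  | succ k ih =>
    intro e counts dups hLe he hinv
    have hlt : e < (ds.length : Int) := by push_cast at he ⊢; omega
    rw [PySem.List.pyRange_one_cons hlt]
    simp only [pvBScan, pvFirst]
    by_cases hnd : (pvWin ds L e).Nodup
    · have hz : dups = 0 := by
        rw [hinv.2]
        exact_mod_cast congrArg (Nat.cast : Nat → Int) ((pv_dupF_card_zero_iff _).mpr hnd)
      rw [if_pos (beq_iff_eq.mpr hz), if_pos hnd]
    · have hz : ¬ dups = 0 := by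
        rw [hinv.2]
        intro hh
        exact hnd ((pv_dupF_card_zero_iff _).mp (by exact_mod_cast hh))
      rw [if_neg (fun hh => hz (eq_of_beq hh)), if_neg hnd]
      have hs0 : (0:Int) ≤ e - L := by omega
      have hsnat : (e - L).toNat + L.toNat = e.toNat := by omega
      have het : e.toNat < ds.length := by omega
      have hst : (e - L).toNat < ds.length := by omega
      have hinc : PySem.List.pyGetD ds e ' ' = ds[e.toNat]'het :=
        PySem.List.pyGetD_eq_getElem ds ' ' (by omega) (by omega)
      have hout : PySem.List.pyGetD ds (e - L) ' ' = ds[(e - L).toNat]'hst :=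
        PySem.List.pyGetD_eq_getElem ds ' ' (by omega) (by omega)
      have hext : pvWin ds L e ++ [ds[e.toNat]'het] = (ds.drop (e - L).toNat).take (L.toNat + 1) := by
        unfold pvWin
        rw [pv_take_snoc ds (e - L).toNat L.toNat (by omega)]
        simp only [hsnat]
      have hcons : (ds.drop (e - L).toNat).take (L.toNat + 1)
          = ds[(e - L).toNat]'hst :: pvWin ds L (e + 1) := by
        unfold pvWin
        rw [show (e + 1 - L).toNat = (e - L).toNat + 1 from by omega,
          List.drop_eq_getElem_cons hst, List.take_succ_cons]
      have hsplit : pvWin ds L e ++ [ds[e.toNat]'het]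
          = ds[(e - L).toNat]'hst :: pvWin ds L (e + 1) := hext.trans hcons
      obtain ⟨hc1, hd1⟩ := pv_insert_inv counts dups (pvWin ds L e) (ds[e.toNat]'het) hinv.1 hinv.2
      rw [hsplit] at hc1 hd1
      obtain ⟨hc2, hd2⟩ := pv_remove_inv
        (counts.insert (ds[e.toNat]'het) (counts.getD (ds[e.toNat]'het) 0 + 1))
        (if (counts.insert (ds[e.toNat]'het) (counts.getD (ds[e.toNat]'het) 0 + 1)).getD (ds[e.toNat]'het) 0 == 2
          then dups + 1 else dups)
        (pvWin ds L (e + 1)) (ds[(e - L).toNat]'hst) hc1 hd1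
      rw [hinc, hout]
      exact ih (e + 1) _ _ (by omega) (by push_cast at he ⊢; omega) ⟨hc2, hd2⟩

-- B's first loop establishes the invariant for the initial window
theorem pv_fill_aux (ds : List Char) (L : Int) (hLn : L ≤ (ds.length : Int)) :
    ∀ (j : Nat), (j : Int) ≤ L →
      (∀ c, (((PySem.List.pyRange 0 (j:Int)).foldl (pvBStep ds) (PySem.Dict.empty, 0)).1).getD c 0
          = ((ds.take j).count c : Int)) ∧
      ((PySem.List.pyRange 0 (j:Int)).foldl (pvBStep ds) (PySem.Dict.empty, 0)).2
          = ((pvDupF (ds.take j)).card : Int) := by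
  intro j
  induction j with
  | zero =>
    intro _
    rw [show ((0:Nat):Int) = 0 from rfl, PySem.List.pyRange_one_eq_nil le_rfl]
    constructor
    · intro c; simp [PySem.Dict.getD_empty]
    · simp [pvDupF]
  | succ j ih =>
    intro hj
    have hj' : (j : Int) ≤ L := by push_cast at hj ⊢; omega
    obtain ⟨h1, h2⟩ := ih hj'
    have hcast : ((j+1 : Nat) : Int) = (j : Int) + 1 := by push_cast; ring
    rw [hcast, PySem.List.pyRange_one_succ_right (by positivity), List.foldl_append]
    simp only [List.foldl_cons, List.foldl_nil]
    have hjlen : j < ds.length := by omega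
    have hgd : PySem.List.pyGetD ds (j:Int) ' ' = ds[j]'hjlen :=
      PySem.List.pyGetD_eq_getElem ds ' ' (by omega) (by omega)
    have htake : ds.take (j+1) = ds.take j ++ [ds[j]'hjlen] := by
      have h0 := pv_take_snoc ds 0 j (by omega)
      simp only [List.drop_zero, Nat.zero_add] at h0
      exact h0
    simp only [pvBStep, hgd]
    obtain ⟨hc, hd⟩ := pv_insert_inv _ _ (ds.take j) (ds[j]'hjlen) h1 h2
    rw [htake]
    exact ⟨hc, hd⟩

-- ===== VERDICT (by name: the statement is the Claim_ definition above) =====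
theorem get_first_unique_sequence_index_of_length_spec : Claim_equal_get_first_unique_sequence_index_of_length := by
  intro datastream length _hDom hPre
  have hL : 0 ≤ length := hPre
  unfold Spec_get_first_unique_sequence_index_of_length
  unfold get_first_unique_sequence_index_of_length get_first_unique_sequence_index_of_length_alt
  set ds := datastream.toList with hds
  by_cases hn : length ≥ (ds.length : Int)
  · rw [pvAWhile, dif_neg (by omega), if_pos hn]
  · rw [if_neg hn]
    have hlt : length < (ds.length : Int) := by omega
    -- A's side
    have hA := pv_AWhile_eq_first ds length hL ((ds.length : Int) - length).toNat length le_rfl (by omega)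
    rw [sub_self] at hA
    rw [hA]
    -- B's side: initial invariant
    have hfill := pv_fill_aux ds length (by omega) length.toNat (by omega)
    have hwin : ds.take length.toNat = pvWin ds length length := by
      unfold pvWin
      rw [show (length - length).toNat = 0 from by omega, List.drop_zero]
    have hLc : ((length.toNat : Nat) : Int) = length := by omega
    rw [hLc, hwin] at hfill
    exact (pv_BScan_eq_first ds length hL ((ds.length : Int) - length).toNat length _ _ le_rfl
      (by omega) ⟨hfill.1, hfill.2⟩).symm
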